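-- pv_equiv track=rewrite | github.com/MasterHongYu/Python-3 | codewars.py | sum_edges
-- ===== SOURCE A (Python) =====
-- def sum_edges(n):
--     Sum,a = 0,5
--     for i in range(sum(range(1,n + 1)) + 1) :
--         Sum += i
--     for i in range(1,n+1) :
--         if i >= 3 and i < n :
--             Sum -= sum(range(a,a+(i-2)))
--             a += i
--     return(Sum)
-- ===== SOURCE B (Python) =====
-- def sum_edges(n):
--     # sum 0..T for T = 1+2+...+n, via triangular-number formulas,
--     # then subtract each correction block with the arithmetic-series formula
--     t = n * (n + 1) // 2 if n > 0 else 0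
--     total = t * (t + 1) // 2
--     a = 5
--     for i in range(3, n):
--         k = i - 2
--         total -= k * a + k * (k - 1) // 2
--         a += i
--     return total
-- ===== Notes on version B (the rewrite author's own statement) =====
-- stated objective: faster
-- what changed: replaced the O(n^2) accumulation loop by triangular-number closed forms and computed each correction block with the arithmetic-series formula in a single O(n) loop
import Mathlib
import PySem

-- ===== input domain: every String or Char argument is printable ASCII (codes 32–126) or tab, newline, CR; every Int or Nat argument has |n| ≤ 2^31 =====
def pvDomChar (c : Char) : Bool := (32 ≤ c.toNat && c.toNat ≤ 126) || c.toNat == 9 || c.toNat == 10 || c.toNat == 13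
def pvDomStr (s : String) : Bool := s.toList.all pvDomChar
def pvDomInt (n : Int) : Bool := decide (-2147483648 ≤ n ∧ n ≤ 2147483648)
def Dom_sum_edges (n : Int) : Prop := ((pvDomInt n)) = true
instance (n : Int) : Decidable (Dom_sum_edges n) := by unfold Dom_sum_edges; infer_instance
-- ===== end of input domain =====

-- B replaces A's O(n^2) accumulation loop by triangular-number formulas and computes each
-- correction block by the arithmetic-series formula in one O(n) loop (objective: faster).

-- ===== PORT A =====
-- Python's builtin sum over a list of ints
def pySum (xs : List Int) : Int := xs.foldl (fun acc i => acc + i) 0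

def sum_edges (n : Int) : Int :=
  let t := pySum (PySem.List.pyRange 1 (n + 1) 1)
  let s1 := (PySem.List.pyRange 0 (t + 1) 1).foldl (fun acc i => acc + i) 0
  let p := (PySem.List.pyRange 1 (n + 1) 1).foldl
    (fun (st : Int × Int) i =>
      if 3 ≤ i ∧ i < n then
        (st.1 - pySum (PySem.List.pyRange st.2 (st.2 + (i - 2)) 1), st.2 + i)
      else st) (s1, 5)
  p.1

-- ===== PORT B =====
def sum_edges_alt (n : Int) : Int :=
  let t := if n > 0 then PySem.Int.floordiv (n * (n + 1)) 2 else 0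
  let total := PySem.Int.floordiv (t * (t + 1)) 2
  let p := (PySem.List.pyRange 3 n 1).foldl
    (fun (st : Int × Int) i =>
      let k := i - 2
      (st.1 - (k * st.2 + PySem.Int.floordiv (k * (k - 1)) 2), st.2 + i)) (total, 5)
  p.1

-- ===== PRECONDITION & SPEC =====
def Spec_sum_edges (n : Int) (out : Int) : Prop := out = sum_edges_alt n
instance (n : Int) (out : Int) : Decidable (Spec_sum_edges n out) := by unfold Spec_sum_edges; infer_instance

-- ===== CLAIM =====
def Claim_equal_sum_edges : Prop := ∀ (n : Int), Dom_sum_edges n → Spec_sum_edges n (sum_edges n)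

-- ===== LEMMAS AND PROOFS =====

-- sum of range(a, a+k), stated doubled to stay division-free
theorem pv_sumR2 (k : Nat) : ∀ (a s : Int),
    2 * (PySem.List.pyRange a (a + (k : Int)) 1).foldl (fun acc i => acc + i) s
      = 2 * s + (k : Int) * (2 * a + (k : Int) - 1) := by
  induction k with
  | zero => intro a s; simp
  | succ k ih =>
    intro a s
    have h : PySem.List.pyRange a (a + ((k+1 : Nat) : Int)) 1
        = PySem.List.pyRange a (a + (k : Int)) 1 ++ [a + (k : Int)] := by
      have := PySem.List.pyRange_one_succ_right (a := a) (b := a + (k : Int)) (by omega)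
      rw [← this]; push_cast; ring_nf
    rw [h, List.foldl_append]
    simp only [List.foldl_cons, List.foldl_nil]
    have := ih a s
    push_cast
    linarith [this]

theorem pv_pySum2 (a b : Int) (h : a ≤ b) :
    2 * pySum (PySem.List.pyRange a b 1) = (b - a) * (a + b - 1) := by
  have hk : b = a + ((b - a).toNat : Int) := by omega
  have := pv_sumR2 (b - a).toNat a 0
  unfold pySum
  rw [hk, this]
  have : ((b - a).toNat : Int) = b - a := by omega
  rw [this]; ring

-- exact division helper: if 2*x = a then a // 2 = x (Python floor division)
theorem pv_fd2 (a x : Int) (h : 2 * x = a) : PySem.Int.floordiv a 2 = x := by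
  rw [PySem.Int.floordiv_eq_ediv_of_pos (by norm_num)]
  omega

-- one correction block: sum(range(a, a+(i-2))) = (i-2)*a + (i-2)*(i-3)//2  for i ≥ 3
theorem pv_block (a i : Int) (hi : 3 ≤ i) :
    pySum (PySem.List.pyRange a (a + (i - 2)) 1)
      = (i - 2) * a + PySem.Int.floordiv ((i - 2) * (i - 2 - 1)) 2 := by
  have hs : 2 * pySum (PySem.List.pyRange a (a + (i - 2)) 1)
      = (i - 2) * (2 * a + (i - 2) - 1) := by
    rw [pv_pySum2 a (a + (i - 2)) (by omega)]; ring
  have heven : ∃ r : Int, (i - 2) * (i - 2 - 1) = 2 * r := by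
    rcases Int.even_or_odd (i - 2) with ⟨r, hr⟩ | ⟨r, hr⟩
    · exact ⟨r * (i - 2 - 1), by rw [hr]; ring⟩
    · exact ⟨(i - 2) * r, by rw [hr]; ring⟩
  obtain ⟨r, hr⟩ := heven
  rw [hr, pv_fd2 (2 * r) r rfl]
  nlinarith [hs]

-- ===== VERDICT =====
theorem sum_edges_spec : Claim_equal_sum_edges := by
  intro n _
  unfold Spec_sum_edges
  rcases lt_or_ge n 1 with hn | hn
  · -- n ≤ 0: every range is empty (or just [0]); both return 0
    have hnil : PySem.List.pyRange 1 (n + 1) 1 = [] :=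
      PySem.List.pyRange_one_eq_nil (by omega)
    have hnil3 : PySem.List.pyRange 3 n 1 = [] :=
      PySem.List.pyRange_one_eq_nil (by omega)
    have h01 : PySem.List.pyRange 0 1 1 = [0] := by decide
    have hng : ¬ n > 0 := by omega
    simp only [sum_edges, sum_edges_alt, hnil, hnil3, pySum, List.foldl_nil, h01,
      List.foldl_cons, add_zero, zero_add, if_neg hng]
    decide
  rcases lt_or_ge n 4 with hn4 | hn4
  · interval_cases n <;> decide
  -- n ≥ 4
  unfold sum_edges sum_edges_alt
  dsimp only
  set t := pySum (PySem.List.pyRange 1 (n + 1) 1) with ht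
  have h2t : 2 * t = n * (n + 1) := by
    rw [ht, pv_pySum2 1 (n + 1) (by omega)]; ring
  have htnn : 0 ≤ t := by nlinarith
  set s1 := (PySem.List.pyRange 0 (t + 1) 1).foldl (fun acc i => acc + i) 0 with hs1
  have h2s1 : 2 * s1 = t * (t + 1) := by
    have hp : 2 * pySum (PySem.List.pyRange 0 (t + 1) 1) = (t + 1) * t := by
      rw [pv_pySum2 0 (t + 1) (by omega)]; ring
    unfold pySum at hp
    rw [hs1]; linarith [hp]
  -- B's starting total equals A's s1
  rw [if_pos (by omega : n > 0), pv_fd2 (n * (n + 1)) t h2t, pv_fd2 (t * (t + 1)) s1 h2s1]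
  -- A's loop: split range(1, n+1) = [1, 2] ++ range(3, n) ++ [n]
  have hsplit : PySem.List.pyRange 1 (n + 1) 1
      = [1, 2] ++ PySem.List.pyRange 3 n 1 ++ [n] := by
    have h1 : PySem.List.pyRange 1 (n + 1) 1
        = PySem.List.pyRange 1 3 1 ++ PySem.List.pyRange 3 (n + 1) 1 :=
      PySem.List.pyRange_one_append 1 3 (n + 1) (by omega) (by omega)
    have h2 : PySem.List.pyRange 3 (n + 1) 1
        = PySem.List.pyRange 3 n 1 ++ [n] := by
      have := PySem.List.pyRange_one_succ_right (a := 3) (b := n) (by omega)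
      rw [← this]
    have h3 : PySem.List.pyRange 1 3 1 = [1, 2] := by decide
    rw [h1, h2, h3, List.append_assoc]
  rw [hsplit, List.foldl_append, List.foldl_append]
  simp only [List.foldl_cons, List.foldl_nil]
  rw [if_neg (by omega : ¬ ((3:Int) ≤ 1 ∧ (1:Int) < n)),
      if_neg (by omega : ¬ ((3:Int) ≤ 2 ∧ (2:Int) < n)),
      if_neg (by omega : ¬ ((3:Int) ≤ n ∧ n < n))]
  -- the two folds over range(3, n) agree pointwise on its members
  have hfold := PySem.List.foldl_congr_mem
    (l := PySem.List.pyRange 3 n 1) (init := (s1, (5:Int)))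
    (f := fun (st : Int × Int) i =>
      if 3 ≤ i ∧ i < n then
        (st.1 - pySum (PySem.List.pyRange st.2 (st.2 + (i - 2)) 1), st.2 + i)
      else st)
    (g := fun (st : Int × Int) i =>
      let k := i - 2
      (st.1 - (k * st.2 + PySem.Int.floordiv (k * (k - 1)) 2), st.2 + i))
    (by
      intro st i hi
      rw [PySem.List.mem_pyRange_one] at hi
      simp only [if_pos hi]
      rw [pv_block st.2 i hi.1])
  rw [hfold]
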